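-- pv_equiv track=rewrite | github.com/samuller/genuml | genuml.py | split_indices_exclude
-- ===== SOURCE A (Python) =====
-- def split_indices_exclude(string, splits):
--     """Split string at indices, and also exclude characters at each index."""
--     if len(splits) == 0:
--         return [string]
--     parts = [string[0:splits[0]]]
--     for idx, spl in enumerate(splits):
--         if idx == 0:
--             continue
--         beg = splits[idx-1]+1
--         end = spl
--         parts.append(string[beg:end])
--     parts.append(string[splits[-1]+1:])
--     return parts
-- ===== SOURCE B (Python) =====
-- def split_indices_exclude(string, splits):
--     """Split string at indices, and also exclude characters at each index."""
--     parts = []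
--     end = None
--     for s in reversed(splits):
--         parts.append(string[s + 1:end])
--         end = s
--     parts.append(string[:end])
--     return parts[::-1]
-- ===== Notes on version B (the rewrite author's own statement) =====
-- stated objective: simpler
-- what changed: Builds the output back-to-front: one uniform reverse pass over the splits carrying the current right boundary (starting open-ended as None), then a final head piece and one list reversal, instead of A's forward position-aware loop with its empty-splits guard, idx==0 skip and separate first/last appends.
import Mathlib
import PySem

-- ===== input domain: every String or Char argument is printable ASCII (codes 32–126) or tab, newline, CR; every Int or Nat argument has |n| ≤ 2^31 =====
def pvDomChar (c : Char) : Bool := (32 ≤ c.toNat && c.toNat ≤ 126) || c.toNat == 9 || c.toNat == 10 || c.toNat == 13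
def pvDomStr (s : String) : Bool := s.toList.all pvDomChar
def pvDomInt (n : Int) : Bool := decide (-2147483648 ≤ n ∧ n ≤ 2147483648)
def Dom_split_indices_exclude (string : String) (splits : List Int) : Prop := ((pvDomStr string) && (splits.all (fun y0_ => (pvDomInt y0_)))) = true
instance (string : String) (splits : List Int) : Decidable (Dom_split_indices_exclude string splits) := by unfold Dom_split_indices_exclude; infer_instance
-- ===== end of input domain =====

-- B builds the output back-to-front: one uniform reverse pass over splits carrying the current
-- right boundary, then the head piece and one reversal, instead of A's forward position-aware
-- loop with its guards and separate first/last appends; objective: simpler.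

-- ===== PORT A =====
def split_indices_exclude (string : String) (splits : List Int) : List String :=
  match splits with
  | [] => [string]
  | s0 :: _ =>
    let parts := [PySem.Str.slice string (some 0) (some s0)]
    let parts := (PySem.List.enumerate splits 0).foldl
      (fun parts p =>
        if p.1 == 0 then parts
        else
          let beg := (PySem.List.pyGet? splits (p.1 - 1)).getD 0 + 1
          let e := p.2
          parts ++ [PySem.Str.slice string (some beg) (some e)]) parts
    parts ++ [PySem.Str.slice string (some ((PySem.List.pyGet? splits (-1)).getD 0 + 1)) none]

-- ===== PORT B =====
-- B builds back-to-front: a reverse pass over splits carrying the current right boundary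
-- (`end`, initially none = open-ended), then the head piece, then one reversal.
def split_indices_exclude_alt (string : String) (splits : List Int) : List String :=
  let st := splits.reverse.foldl
    (fun (st : List String × Option Int) s =>
      (st.1 ++ [PySem.Str.slice string (some (s + 1)) st.2], some s)) ([], none)
  (st.1 ++ [PySem.Str.slice string none st.2]).reverse

-- ===== PRECONDITION & SPEC =====
def Spec_split_indices_exclude (string : String) (splits : List Int) (out : List String) : Prop := out = split_indices_exclude_alt string splits
instance (string : String) (splits : List Int) (out : List String) : Decidable (Spec_split_indices_exclude string splits out) := by unfold Spec_split_indices_exclude; infer_instance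

-- ===== CLAIM (what is proved, stated in full; the proofs are below) =====
def Claim_equal_split_indices_exclude : Prop := ∀ (string : String) (splits : List Int), Dom_split_indices_exclude string splits → Spec_split_indices_exclude string splits (split_indices_exclude string splits)

-- ===== LEMMAS AND PROOFS =====

-- the common "chain of slices", final slice written up to len(string)
def pvChain (string : String) (prev : Int) : List Int → List String
  | [] => [PySem.Str.slice string (some (prev + 1)) (some (PySem.Str.len string))]
  | s :: ss => PySem.Str.slice string (some (prev + 1)) (some s) :: pvChain string s ss

-- the partial chain A's middle loop produces (no final piece)
def pvChainA (string : String) (prev : Int) : List Int → List String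
  | [] => []
  | s :: ss => PySem.Str.slice string (some (prev + 1)) (some s) :: pvChainA string s ss

-- string[a:] = string[a:len(string)]
theorem pvSlice_none_eq_len (string : String) (a : Int) :
    PySem.Str.slice string (some a) none
      = PySem.Str.slice string (some a) (some (PySem.Str.len string)) := by
  apply String.toList_inj.mp
  rw [PySem.Str.toList_slice, PySem.Str.toList_slice,
      PySem.Chars.slice_eq_listSlice, PySem.Chars.slice_eq_listSlice]
  show PySem.List.slice string.toList (some a) none
      = PySem.List.slice string.toList (some a) (some (string.toList.length : Int))
  rw [PySem.List.slice_some_none]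
  simp [PySem.List.slice]

-- appending A's final piece (bounded by splits[-1]) to the partial chain gives the uniform chain
theorem pvChainA_last (string : String) (prev : Int) (ss : List Int) :
    pvChainA string prev ss
        ++ [PySem.Str.slice string (some ((prev :: ss).getLast (by simp) + 1)) none]
      = pvChain string prev ss := by
  induction ss generalizing prev with
  | nil => simp [pvChainA, pvChain, pvSlice_none_eq_len]
  | cons s ss ih =>
      have hl : (prev :: s :: ss).getLast (by simp) = (s :: ss).getLast (by simp) :=
        List.getLast_cons _
      simp only [pvChainA, pvChain, List.cons_append, hl]
      rw [ih]

-- A's loop over the enumerated tail produces the partial chain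
theorem pvFoldA (string : String) (splits : List Int) (ss : List Int) (k : Nat) (P : List String)
    (hk : 1 ≤ k) (hdrop : splits.drop k = ss) :
    List.foldl
      (fun parts (p : Int × Int) =>
        if p.1 == 0 then parts
        else
          let beg := (PySem.List.pyGet? splits (p.1 - 1)).getD 0 + 1
          let e := p.2
          parts ++ [PySem.Str.slice string (some beg) (some e)]) P
      (PySem.List.enumerate ss (k : Int))
      = P ++ pvChainA string (splits.getD (k - 1) 0) ss := by
  induction ss generalizing k P with
  | nil => simp [PySem.List.enumerate, pvChainA]
  | cons s ss ih =>
      rw [PySem.List.enumerate_cons]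
      simp only [List.foldl_cons]
      have hk0 : ((k : Int) == 0) = false := beq_eq_false_iff_ne.mpr (by omega)
      rw [hk0]
      simp only [Bool.false_eq_true, if_false]
      have hidx : (PySem.List.pyGet? splits ((k : Int) - 1)).getD 0 = splits.getD (k - 1) 0 := by
        have h1 : (k : Int) - 1 = ((k - 1 : Nat) : Int) := by omega
        rw [h1, PySem.List.pyGet?_natCast]
        simp [List.getD]
      have hks : splits.getD k 0 = s := by
        have h0 : (splits.drop k)[0]? = some s := by rw [hdrop]; rfl
        rw [List.getElem?_drop] at h0
        simp only [Nat.add_zero] at h0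
        simp [List.getD, h0]
      have hdrop' : splits.drop (k + 1) = ss := by
        have h2 : splits.drop (k + 1) = (splits.drop k).drop 1 := by
          rw [List.drop_drop, Nat.add_comm]
        rw [h2, hdrop, List.drop_one, List.tail_cons]
      have hih := ih (k + 1)
        (P ++ [PySem.Str.slice string (some ((PySem.List.pyGet? splits ((k : Int) - 1)).getD 0 + 1))
          (some s)]) (by omega) hdrop'
      push_cast at hih ⊢
      rw [hih]
      simp only [hks, hidx, pvChainA]
      simp

-- string[0:len(string)] = string
theorem pvSlice_full (string : String) :
    PySem.Str.slice string (some 0) (some (PySem.Str.len string)) = string := by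
  apply String.toList_inj.mp
  rw [PySem.Str.toList_slice, PySem.Chars.slice_eq_listSlice]
  show PySem.List.slice string.toList (some 0) (some (string.toList.length : Int))
      = string.toList
  simp [PySem.List.slice]

-- the end boundary B's reverse pass pairs with a given split-list suffix
def pvOptEnd : List Int → Option Int
  | [] => none
  | s :: _ => some s

-- the pieces B produces for the tail of the split list (front-to-back order)
def pvTail (string : String) : List Int → List String
  | [] => []
  | s :: ss => PySem.Str.slice string (some (s + 1)) (pvOptEnd ss) :: pvTail string ss

-- B's reverse fold, read as a foldr, computes the reversed tail pieces and the first boundary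
theorem pvFoldB (string : String) (ss : List Int) :
    ss.foldr
      (fun s (st : List String × Option Int) =>
        (st.1 ++ [PySem.Str.slice string (some (s + 1)) st.2], some s)) ([], none)
      = ((pvTail string ss).reverse, pvOptEnd ss) := by
  induction ss with
  | nil => rfl
  | cons s ss ih => simp [pvTail, pvOptEnd, ih]

-- a chain with open or boundary end equals the uniform chain
theorem pvTail_chain (string : String) (prev : Int) (ss : List Int) :
    PySem.Str.slice string (some (prev + 1)) (pvOptEnd ss) :: pvTail string ss
      = pvChain string prev ss := by
  induction ss generalizing prev with
  | nil => simp [pvTail, pvOptEnd, pvChain, pvSlice_none_eq_len]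
  | cons s ss ih =>
      simp only [pvTail, pvChain]
      rw [← ih s]
      rfl

-- string[:e] = string[0:e] (end given or open)
theorem pvSlice_none_start (string : String) (e : Option Int) :
    PySem.Str.slice string none e = PySem.Str.slice string (some 0) e := by
  apply String.toList_inj.mp
  rw [PySem.Str.toList_slice, PySem.Str.toList_slice,
      PySem.Chars.slice_eq_listSlice, PySem.Chars.slice_eq_listSlice]
  cases e <;> simp [PySem.List.slice]

-- B equals the uniform chain with sentinel -1
theorem pvB_eq_chain (string : String) (splits : List Int) :
    split_indices_exclude_alt string splits = pvChain string (-1) splits := by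
  show (((splits.reverse.foldl
      (fun (st : List String × Option Int) s =>
        (st.1 ++ [PySem.Str.slice string (some (s + 1)) st.2], some s)) ([], none)).1
      ++ [PySem.Str.slice string none (splits.reverse.foldl
      (fun (st : List String × Option Int) s =>
        (st.1 ++ [PySem.Str.slice string (some (s + 1)) st.2], some s)) ([], none)).2]).reverse)
      = pvChain string (-1) splits
  rw [List.foldl_reverse, pvFoldB]
  simp only [List.reverse_append, List.reverse_reverse, List.reverse_cons, List.reverse_nil,
    List.nil_append, List.singleton_append]
  rw [pvSlice_none_start]
  have := pvTail_chain string (-1) splits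
  rw [show (-1 + 1 : Int) = 0 from by norm_num] at this
  exact this

-- ===== VERDICT (by name: the statement is the Claim_ definition above) =====
theorem split_indices_exclude_spec : Claim_equal_split_indices_exclude := by
  intro string splits _
  show split_indices_exclude string splits = split_indices_exclude_alt string splits
  have hB : split_indices_exclude_alt string splits = pvChain string (-1) splits :=
    pvB_eq_chain string splits
  rw [hB]
  cases splits with
  | nil =>
      show [string] = pvChain string (-1) []
      show [string] = [PySem.Str.slice string (some (-1 + 1)) (some (PySem.Str.len string))]
      rw [show (-1 + 1 : Int) = 0 from by norm_num, pvSlice_full]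
  | cons s0 rest =>
      show ((PySem.List.enumerate (s0 :: rest) 0).foldl
          (fun parts p =>
            if p.1 == 0 then parts
            else
              let beg := (PySem.List.pyGet? (s0 :: rest) (p.1 - 1)).getD 0 + 1
              let e := p.2
              parts ++ [PySem.Str.slice string (some beg) (some e)])
          [PySem.Str.slice string (some 0) (some s0)])
        ++ [PySem.Str.slice string
              (some ((PySem.List.pyGet? (s0 :: rest) (-1)).getD 0 + 1)) none]
        = pvChain string (-1) (s0 :: rest)
      rw [PySem.List.enumerate_cons]
      simp only [List.foldl_cons, BEq.rfl, if_true, zero_add]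
      have h1 := pvFoldA string (s0 :: rest) rest 1
        [PySem.Str.slice string (some 0) (some s0)] (by omega) (by simp)
      push_cast at h1
      rw [h1]
      have hlast : (PySem.List.pyGet? (s0 :: rest) (-1)).getD 0
          = (s0 :: rest).getLast (by simp) := by
        rw [PySem.List.pyGet?_neg_one]
        simp [List.getLast?_eq_some_getLast]
      rw [List.append_assoc]
      simp only [List.getD_cons_zero, List.singleton_append]
      rw [hlast, pvChainA_last string s0 rest]
      show _ = PySem.Str.slice string (some (-1 + 1)) (some s0) :: pvChain string s0 rest
      norm_num
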